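-- pv_equiv track=rewrite | github.com/Dyumnin-Interns/mipi-csi2 | test/test_dut.py | csi2_header_ecc
-- ===== SOURCE A (Python) =====
-- def csi2_header_ecc(byte0, byte1, byte2):
--     """
--     Deterministic 6-bit ECC used in tests (SURROGATE).
--     NOTE: This is NOT the official CSI-2 Hamming(24,18) mapping.
--     Replace with spec ECC if you need protocol interoperability.
--     """
--     x = byte0 | (byte1 << 8) | (byte2 << 16)
--     p = []
--     for shift in range(6):
--         acc = 0
--         for i in range(24):
--             if ((i >> shift) & 1) == 1:
--                 acc ^= (x >> i) & 1
--         p.append(acc)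
--     ecc = 0
--     for i, bit in enumerate(p):
--         ecc |= (bit & 1) << i
--     return ecc & 0x3F
-- ===== SOURCE B (Python) =====
-- def csi2_header_ecc(byte0, byte1, byte2):
--     """
--     Deterministic 6-bit ECC used in tests (SURROGATE).
--     Same value as the reference: for each set data bit i, XOR the index i
--     itself into the accumulator; bit j of the result is then the parity of
--     data bits whose index has bit j set, collapsing the nested 6x24 parity
--     loops into one pass over the 24 data bits.
--     """
--     x = byte0 | (byte1 << 8) | (byte2 << 16)
--     ecc = 0
--     for i in range(24):
--         if (x >> i) & 1 == 1:
--             ecc ^= i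
--     return ecc & 0x3F
-- ===== Notes on version B (the rewrite author's own statement) =====
-- stated objective: simpler
-- what changed: Replaced the nested 6x24 parity loops plus a bit-assembly pass with a single flat loop over the 24 data bits that XORs each set bit's index into the accumulator (bit j of the XOR of indices is exactly parity bit j).
import Mathlib
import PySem

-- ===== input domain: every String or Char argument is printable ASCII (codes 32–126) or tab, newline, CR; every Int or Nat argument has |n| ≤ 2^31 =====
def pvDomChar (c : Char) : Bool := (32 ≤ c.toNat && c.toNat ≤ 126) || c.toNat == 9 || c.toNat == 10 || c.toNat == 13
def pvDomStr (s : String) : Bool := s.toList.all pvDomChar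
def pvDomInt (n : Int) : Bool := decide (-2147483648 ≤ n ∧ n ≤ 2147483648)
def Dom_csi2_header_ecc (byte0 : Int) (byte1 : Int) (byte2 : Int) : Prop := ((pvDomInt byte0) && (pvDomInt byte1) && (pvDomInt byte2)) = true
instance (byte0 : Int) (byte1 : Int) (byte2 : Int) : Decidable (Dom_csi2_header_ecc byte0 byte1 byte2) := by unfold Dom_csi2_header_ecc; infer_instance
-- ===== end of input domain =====

-- B replaces A's nested 6x24 parity loops + bit-assembly pass by one flat pass
-- over the 24 data bits, XOR-ing each set bit's index into the accumulator (simpler).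


-- ===== PORT A =====
def csi2_header_ecc (byte0 : Int) (byte1 : Int) (byte2 : Int) : Int :=
  let x := PySem.Int.bor (PySem.Int.bor byte0 (byte1 <<< (8:Int))) (byte2 <<< (16:Int))
  let p := (PySem.List.pyRange 0 6 1).foldl (fun p shift =>
      p ++ [(PySem.List.pyRange 0 24 1).foldl (fun acc i =>
          if PySem.Int.band (i >>> shift) 1 == 1 then
            PySem.Int.bxor acc (PySem.Int.band (x >>> i) 1)
          else acc) 0]) ([] : List Int)
  let ecc := (PySem.List.enumerate p).foldl (fun ecc ib =>
      PySem.Int.bor ecc (PySem.Int.band ib.2 1 <<< ib.1)) 0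
  PySem.Int.band ecc 63

-- ===== PORT B =====
def csi2_header_ecc_alt (byte0 : Int) (byte1 : Int) (byte2 : Int) : Int :=
  let x := PySem.Int.bor (PySem.Int.bor byte0 (byte1 <<< (8:Int))) (byte2 <<< (16:Int))
  let ecc := (PySem.List.pyRange 0 24 1).foldl (fun ecc i =>
      if PySem.Int.band (x >>> i) 1 == 1 then PySem.Int.bxor ecc i else ecc) 0
  PySem.Int.band ecc 63

-- ===== PRECONDITION & SPEC =====
def Spec_csi2_header_ecc (byte0 : Int) (byte1 : Int) (byte2 : Int) (out : Int) : Prop := out = csi2_header_ecc_alt byte0 byte1 byte2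
instance (byte0 : Int) (byte1 : Int) (byte2 : Int) (out : Int) : Decidable (Spec_csi2_header_ecc byte0 byte1 byte2 out) := by unfold Spec_csi2_header_ecc; infer_instance

-- ===== CLAIM (what is proved, stated in full; the proofs are below) =====
def Claim_equal_csi2_header_ecc : Prop := ∀ (byte0 : Int) (byte1 : Int) (byte2 : Int), Dom_csi2_header_ecc byte0 byte1 byte2 → Spec_csi2_header_ecc byte0 byte1 byte2 (csi2_header_ecc byte0 byte1 byte2)

-- ===== LEMMAS AND PROOFS =====

-- the i-th data bit of x, as a Bool (exactly the test both programs make)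
def pvBit (x : Int) (i : Nat) : Bool := PySem.Int.band (x >>> ((i:Int))) 1 == 1

-- the value both programs extract for data bit i is 1 or 0 according to pvBit
theorem pvBit_val (x : Int) (i : Nat) :
    PySem.Int.band (x >>> ((i:Int))) 1 = if pvBit x i then 1 else 0 := by
  unfold pvBit
  rcases PySem.Int.mod_two_eq (x >>> ((i:Int))) with h | h <;>
    rw [PySem.Int.band_one, h] <;> simp

-- A's inner-loop membership test on the index equals Nat.testBit
theorem cond_testBit (k j : Nat) :
    (PySem.Int.band ((k:Int) >>> ((j:Int))) 1 == 1) = k.testBit j := by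
  rw [Int.shiftRight_natCast]
  have h : PySem.Int.band ((k >>> j : Nat) : Int) ((1:Nat):Int) = ((k >>> j) &&& 1 : Nat) :=
    PySem.Int.band_natCast _ _
  simp only [Nat.cast_one] at h
  rw [h]
  unfold Nat.testBit
  rw [Nat.and_comm 1 (k >>> j), Nat.and_one_is_mod]
  rcases Nat.mod_two_eq_zero_or_one (k >>> j) with h2 | h2 <;> rw [h2] <;> decide

-- an Int fold that xors 0/1 values mirrors the Bool xor fold
theorem foldl01 (cond c : Nat → Bool) (l : List Nat) (b : Bool) :
    l.foldl (fun (a : Int) (k : Nat) =>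
        if cond k then PySem.Int.bxor a (if c k then 1 else 0) else a)
      (if b then 1 else 0)
    = if l.foldl (fun (b : Bool) (k : Nat) => if cond k then Bool.xor b (c k) else b) b then 1
      else 0 := by
  induction l generalizing b with
  | nil => rfl
  | cons k t ih =>
    simp only [List.foldl_cons]
    have h3 : (if cond k = true then
          PySem.Int.bxor (if b then (1:Int) else 0) (if c k then 1 else 0)
        else (if b then (1:Int) else 0))
        = if (if cond k = true then Bool.xor b (c k) else b) then (1:Int) else 0 := by
      rcases Bool.dichotomy (cond k) with hc | hc <;> rw [hc] <;>
        rcases Bool.dichotomy (c k) with h4 | h4 <;> rw [h4] <;> cases b <;> decide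
    rw [h3]
    exact ih _

-- casting a Nat fold into an Int fold over the cast list
theorem foldl_cast (f' : Int → Int → Int) (f : Nat → Nat → Nat) (l : List Nat) (a : Nat)
    (h : ∀ (a k : Nat), f' (a:Int) (k:Int) = ((f a k : Nat) : Int)) :
    (l.map (fun (k : Nat) => (k:Int))).foldl f' (a:Int) = ((l.foldl f a : Nat) : Int) := by
  induction l generalizing a with
  | nil => rfl
  | cons k t ih =>
    rw [List.map_cons, List.foldl_cons, List.foldl_cons, h]
    exact ih (f a k)

-- a guarded xor step is an unguarded xor of a conjunction
theorem bool_step (p q b : Bool) :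
    (if p = true then Bool.xor b q else b) = Bool.xor b (q && p) := by
  cases p <;> cases q <;> cases b <;> decide

-- testBit of the xor-of-indices fold is the parity fold over the index bits
theorem testBit_xorfold (c : Nat → Bool) (l : List Nat) (e : Nat) (t : Nat) :
    (l.foldl (fun (e : Nat) (k : Nat) => if c k then e ^^^ k else e) e).testBit t
    = l.foldl (fun (b : Bool) (k : Nat) => Bool.xor b (c k && k.testBit t)) (e.testBit t) := by
  induction l generalizing e with
  | nil => rfl
  | cons k tl ih =>
    simp only [List.foldl_cons]
    by_cases hc : c k = true
    · simp [hc, ih, Nat.testBit_xor]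
    · simp [hc, ih]

-- the common parity of bit t over the 24 data bits
def pvPar (c : Nat → Bool) (t : Nat) : Bool :=
  (List.range 24).foldl (fun (b : Bool) (k : Nat) => Bool.xor b (c k && k.testBit t)) false

-- the Nat-level core: assembling the six parities equals masking the xor of indices
theorem core_nat (c : Nat → Bool) :
    ((((((0 ||| ((if pvPar c 0 then 1 else 0) <<< 0)) ||| ((if pvPar c 1 then 1 else 0) <<< 1))
      ||| ((if pvPar c 2 then 1 else 0) <<< 2)) ||| ((if pvPar c 3 then 1 else 0) <<< 3))
      ||| ((if pvPar c 4 then 1 else 0) <<< 4)) ||| ((if pvPar c 5 then 1 else 0) <<< 5)) &&& 63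
    = ((List.range 24).foldl (fun (e : Nat) (k : Nat) => if c k then e ^^^ k else e) 0)
        &&& 63 := by
  apply Nat.eq_of_testBit_eq
  intro t
  have h63 : (63:Nat).testBit t = decide (t < 6) := by
    have h : (63:Nat) = 2 ^ 6 - 1 := by norm_num
    rw [h, Nat.testBit_two_pow_sub_one]
  have hone : ∀ (b : Bool) (m : Nat),
      (if b then (1:Nat) else 0).testBit m = (b && decide (m = 0)) := by
    intro b m
    cases b
    · simp
    · rcases m with _ | m
      · decide
      · simp [Nat.testBit_add_one]
  have hrhs : ((((List.range 24).foldl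
          (fun (e : Nat) (k : Nat) => if c k then e ^^^ k else e) 0)) &&& 63).testBit t
      = (pvPar c t && decide (t < 6)) := by
    rw [Nat.testBit_and, h63, testBit_xorfold]
    simp [pvPar]
  rw [hrhs, Nat.testBit_and, h63]
  simp only [Nat.testBit_or, Nat.testBit_shiftLeft, hone, Nat.zero_testBit]
  by_cases ht : t < 6
  · interval_cases t <;> simp
  · have hd : decide (t < 6) = false := by simp [ht]
    simp [hd]

-- both ports' bodies agree for every x (stated on the shared let-bodies)
theorem body_eq (x : Int) :
    PySem.Int.band
      ((PySem.List.enumerate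
        ((PySem.List.pyRange 0 6 1).foldl (fun (p : List Int) (shift : Int) =>
          p ++ [(PySem.List.pyRange 0 24 1).foldl (fun (acc : Int) (i : Int) =>
              if PySem.Int.band (i >>> shift) 1 == 1 then
                PySem.Int.bxor acc (PySem.Int.band (x >>> i) 1)
              else acc) 0]) ([] : List Int))).foldl (fun (ecc : Int) (ib : Int × Int) =>
        PySem.Int.bor ecc (PySem.Int.band ib.2 1 <<< ib.1)) 0) 63
    = PySem.Int.band
        ((PySem.List.pyRange 0 24 1).foldl (fun (ecc : Int) (i : Int) =>
          if PySem.Int.band (x >>> i) 1 == 1 then PySem.Int.bxor ecc i else ecc) 0) 63 := by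
  have h24 : PySem.List.pyRange 0 24 1 = (List.range 24).map (fun (k : Nat) => (k:Int)) := by
    decide
  set c : Nat → Bool := fun i => pvBit x i with hc
  -- B side: cast down to the Nat xor fold
  have hB : (PySem.List.pyRange 0 24 1).foldl (fun (ecc : Int) (i : Int) =>
        if PySem.Int.band (x >>> i) 1 == 1 then PySem.Int.bxor ecc i else ecc) 0
      = (((List.range 24).foldl (fun (e : Nat) (k : Nat) => if c k then e ^^^ k else e) 0 : Nat)
          : Int) := by
    rw [h24]
    have harg : ∀ (a k : Nat),
        (fun (ecc : Int) (i : Int) =>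
          if PySem.Int.band (x >>> i) 1 == 1 then PySem.Int.bxor ecc i else ecc)
            (a:Int) (k:Int)
        = (((fun (e : Nat) (k : Nat) => if c k then e ^^^ k else e) a k : Nat) : Int) := by
      intro a k
      simp only [hc, pvBit]
      by_cases hk : (PySem.Int.band (x >>> ((k:Int))) 1 == 1) = true
      · simp [hk, PySem.Int.bxor_natCast]
      · simp [hk]
    have h := foldl_cast
      (fun (ecc : Int) (i : Int) =>
        if PySem.Int.band (x >>> i) 1 == 1 then PySem.Int.bxor ecc i else ecc)
      (fun (e : Nat) (k : Nat) => if c k then e ^^^ k else e)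
      (List.range 24) 0 harg
    simpa only [Nat.cast_zero] using h
  -- A side: each inner fold is the parity bit for its shift
  have hinner : ∀ j : Nat, (PySem.List.pyRange 0 24 1).foldl (fun (acc : Int) (i : Int) =>
        if PySem.Int.band (i >>> ((j:Int))) 1 == 1 then
          PySem.Int.bxor acc (PySem.Int.band (x >>> i) 1)
        else acc) 0 = if pvPar c j then 1 else 0 := by
    intro j
    rw [h24, List.foldl_map]
    have hcong : ∀ (acc : Int), ∀ k ∈ List.range 24,
        (if PySem.Int.band ((k:Int) >>> ((j:Int))) 1 == 1 then
          PySem.Int.bxor acc (PySem.Int.band (x >>> ((k:Int))) 1) else acc)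
        = (if k.testBit j then PySem.Int.bxor acc (if c k then 1 else 0) else acc) := by
      intro acc k _
      rw [cond_testBit, pvBit_val]
    rw [PySem.List.foldl_congr_mem _ _ _ _ hcong]
    have h := foldl01 (fun k => k.testBit j) c (List.range 24) false
    simp only [bool_step] at h
    simpa [pvPar] using h
  -- build the six-element parity list p explicitly
  have h6 : PySem.List.pyRange 0 6 1 = [0, 1, 2, 3, 4, 5] := by decide
  have hband : ∀ (m : Nat), PySem.Int.band (m:Int) 63 = ((m &&& 63 : Nat) : Int) := by
    intro m
    have h := PySem.Int.band_natCast m 63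
    norm_num at h
    exact h
  have hi0 := hinner 0; have hi1 := hinner 1; have hi2 := hinner 2
  have hi3 := hinner 3; have hi4 := hinner 4; have hi5 := hinner 5
  simp only [Nat.cast_ofNat, Nat.cast_zero, Nat.cast_one] at hi0 hi1 hi2 hi3 hi4 hi5
  rw [hB, hband, PySem.List.foldl_append_singleton_eq_map, List.nil_append, h6]
  simp only [List.map_cons, List.map_nil]
  rw [hi0, hi1, hi2, hi3, hi4, hi5]
  rw [← core_nat c]
  generalize pvPar c 0 = b0
  generalize pvPar c 1 = b1
  generalize pvPar c 2 = b2
  generalize pvPar c 3 = b3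
  generalize pvPar c 4 = b4
  generalize pvPar c 5 = b5
  cases b0 <;> cases b1 <;> cases b2 <;> cases b3 <;> cases b4 <;> cases b5 <;> decide

-- ===== VERDICT (by name: the statement is the Claim_ definition above) =====
set_option maxHeartbeats 1000000 in
theorem csi2_header_ecc_spec : Claim_equal_csi2_header_ecc := by
  intro byte0 byte1 byte2 _
  show csi2_header_ecc byte0 byte1 byte2 = csi2_header_ecc_alt byte0 byte1 byte2
  simp only [csi2_header_ecc, csi2_header_ecc_alt]
  exact body_eq (PySem.Int.bor (PySem.Int.bor byte0 (byte1 <<< (8:Int))) (byte2 <<< (16:Int)))
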